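-- pv_equiv track=rewrite | github.com/Rajivrocks-Ltd/A-DS | A2/efficiency.py | naive_linear_scan
-- ===== SOURCE A (Python) =====
-- def naive_linear_scan(grid, value):
--     num_cells_searched = 0
--     for y, row in enumerate(grid):
--         for x, cell_value in enumerate(row):
--             num_cells_searched += 1
--             if cell_value == value:
--                 return num_cells_searched
--     return num_cells_searched
-- ===== SOURCE B (Python) =====
-- def naive_linear_scan(grid, value):
--     flat = [c for row in grid for c in row]
--     try:
--         return flat.index(value) + 1
--     except ValueError:
--         return len(flat)
-- ===== Notes on version B (the rewrite author's own statement) =====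
-- stated objective: alternative
-- what changed: Two staged passes instead of a nested counting loop with early return: first flatten the grid into one list, then a single flat.index lookup (position+1 if found, total length otherwise).
import Mathlib
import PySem

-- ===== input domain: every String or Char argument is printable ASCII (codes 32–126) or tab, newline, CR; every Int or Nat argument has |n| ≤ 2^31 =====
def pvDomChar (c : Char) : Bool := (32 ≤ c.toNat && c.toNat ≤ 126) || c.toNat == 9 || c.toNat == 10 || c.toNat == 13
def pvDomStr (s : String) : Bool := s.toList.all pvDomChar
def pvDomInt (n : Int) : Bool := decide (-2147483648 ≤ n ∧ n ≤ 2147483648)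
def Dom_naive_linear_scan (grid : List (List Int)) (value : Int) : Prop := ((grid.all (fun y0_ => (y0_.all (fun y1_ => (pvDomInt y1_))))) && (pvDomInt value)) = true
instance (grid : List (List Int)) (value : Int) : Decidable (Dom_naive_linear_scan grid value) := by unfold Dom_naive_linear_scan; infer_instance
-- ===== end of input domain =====

-- B flattens the grid and does one index lookup instead of A's nested counting loop; objective: alternative decomposition.

-- ===== PORT A =====
-- literal port of A: per-cell scan with a counter, early return on match
def pvScanRow (value : Int) (acc : Int) : List Int → Option Int
  | [] => none
  | c :: rest =>
      if c = value then some (acc + 1) else pvScanRow value (acc + 1) rest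

def pvScanGrid (value : Int) (acc : Int) : List (List Int) → Int
  | [] => acc
  | row :: rows =>
      match pvScanRow value acc row with
      | some n => n
      | none => pvScanGrid value (acc + row.length) rows

def naive_linear_scan (grid : List (List Int)) (value : Int) : Int :=
  pvScanGrid value 0 grid

-- ===== PORT B =====
-- port of B: flatten (the comprehension), then one flat.index lookup; ValueError branch returns len(flat)
def naive_linear_scan_alt (grid : List (List Int)) (value : Int) : Int :=
  let flat := grid.flatMap (fun row => row)
  match PySem.List.index? flat value with
  | some i => (i : Int) + 1
  | none => (flat.length : Int)

-- ===== PRECONDITION & SPEC =====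
def Spec_naive_linear_scan (grid : List (List Int)) (value : Int) (out : Int) : Prop := out = naive_linear_scan_alt grid value
instance (grid : List (List Int)) (value : Int) (out : Int) : Decidable (Spec_naive_linear_scan grid value out) := by unfold Spec_naive_linear_scan; infer_instance

-- ===== CLAIM =====
def Claim_equal_naive_linear_scan : Prop := ∀ (grid : List (List Int)) (value : Int), Dom_naive_linear_scan grid value → Spec_naive_linear_scan grid value (naive_linear_scan grid value)

-- ===== LEMMAS AND PROOFS =====

theorem pvScanRow_of_not_mem (value acc : Int) (row : List Int) (h : value ∉ row) :
    pvScanRow value acc row = none := by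
  induction row generalizing acc with
  | nil => rfl
  | cons c rest ih =>
      simp only [pvScanRow]
      rw [if_neg (by intro hc; exact h (hc ▸ List.mem_cons_self))]
      exact ih _ (fun hm => h (List.mem_cons_of_mem _ hm))

theorem pvScanRow_of_index? (value acc : Int) (row : List Int) (i : Nat)
    (h : PySem.List.index? row value = some i) :
    pvScanRow value acc row = some (acc + (i : Int) + 1) := by
  induction row generalizing acc i with
  | nil => simp [PySem.List.index?] at h
  | cons c rest ih =>
      by_cases hc : c = value
      · subst hc
        rw [PySem.List.index?_cons_self] at h
        cases h
        simp [pvScanRow]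
      · rw [PySem.List.index?_cons_of_ne rest hc] at h
        cases hj : PySem.List.index? rest value with
        | none => rw [hj] at h; simp at h
        | some j =>
            rw [hj] at h
            simp only [Option.map_some] at h
            cases h
            simp only [pvScanRow, if_neg hc]
            rw [ih _ _ hj]
            congr 1
            push_cast
            ring

theorem pvIndex?_append_of_not_mem (value : Int) (pre suf : List Int) (h : value ∉ pre) :
    PySem.List.index? (pre ++ suf) value = (PySem.List.index? suf value).map (· + pre.length) := by
  induction pre with
  | nil => simp
  | cons c rest ih =>
      have hc : c ≠ value := fun hc => h (hc ▸ List.mem_cons_self)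
      rw [List.cons_append, PySem.List.index?_cons_of_ne _ hc,
        ih (fun hm => h (List.mem_cons_of_mem _ hm))]
      cases PySem.List.index? suf value <;> simp <;> omega

theorem pvScan_eq (value : Int) (grid : List (List Int)) (acc : Int) :
    pvScanGrid value acc grid =
      match PySem.List.index? (grid.flatMap (fun row => row)) value with
      | some i => acc + (i : Int) + 1
      | none => acc + ((grid.flatMap (fun row => row)).length : Int) := by
  induction grid generalizing acc with
  | nil => simp [pvScanGrid, PySem.List.index?]
  | cons row rows ih =>
      simp only [pvScanGrid, List.flatMap_cons]
      by_cases hm : value ∈ row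
      · obtain ⟨i, hi⟩ := Option.isSome_iff_exists.mp ((PySem.List.index?_isSome_iff row value).mpr hm)
        rw [PySem.List.index?_append_of_mem _ hm, hi, pvScanRow_of_index? value acc row i hi]
      · rw [pvScanRow_of_not_mem value acc row hm, ih,
          pvIndex?_append_of_not_mem value row _ hm]
        cases PySem.List.index? (rows.flatMap (fun row => row)) value with
        | none => simp; ring
        | some j => simp; ring

-- ===== VERDICT =====
theorem naive_linear_scan_spec : Claim_equal_naive_linear_scan := by
  intro grid value _
  unfold Spec_naive_linear_scan naive_linear_scan naive_linear_scan_alt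
  rw [pvScan_eq]
  cases h : PySem.List.index? (grid.flatMap (fun row => row)) value with
  | none => simp only [h]; ring
  | some i => simp only [h]; ring
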